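-- pv_equiv track=rewrite | github.com/glsalierno/quick-hazard-assessment-app | parsers/markitdown_parser.py | _markdown_table_blocks
-- ===== SOURCE A (Python) =====
-- def _markdown_table_blocks(text: str) -> list[str]:
--     """Split markdown into contiguous table-like blocks (| ... | lines)."""
--     if not text:
--         return []
--     lines = text.replace("\r\n", "\n").split("\n")
--     blocks: list[list[str]] = []
--     current: list[str] = []
--     for line in lines:
--         line = line.rstrip()
--         if "|" in line and line.strip().startswith("|"):
--             current.append(line)
--         else:
--             if len(current) >= 2:
--                 blocks.append(current)
--             current = []
--     if len(current) >= 2: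
--         blocks.append(current)
--     return ["\n".join(b) for b in blocks]
-- ===== SOURCE B (Python) =====
-- def _markdown_table_blocks(text: str) -> list[str]:
--     """Split markdown into contiguous table-like blocks (| ... | lines)."""
--     if not text:
--         return []
--
--     def is_row(line: str) -> bool:
--         return "|" in line and line.strip().startswith("|")
--
--     rest = [line.rstrip() for line in text.replace("\r\n", "\n").split("\n")][::-1]
--     blocks: list[str] = []
--     while rest:
--         line = rest.pop()
--         if is_row(line):
--             run = [line]
--             while rest and is_row(rest[-1]):
--                 run.append(rest.pop())
--             if len(run) >= 2:
--                 blocks.append("\n".join(run))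
--     return blocks
-- ===== Notes on version B (the rewrite author's own statement) =====
-- stated objective: alternative
-- what changed: Replaces A's accumulator-and-flush state machine (current block carried across the loop with a trailing flush) by a run-extraction scan: rstrip all lines first, then repeatedly pull a whole contiguous run of table rows and emit it if it has at least 2 lines, so no dangling state survives the loop.
import Mathlib
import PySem

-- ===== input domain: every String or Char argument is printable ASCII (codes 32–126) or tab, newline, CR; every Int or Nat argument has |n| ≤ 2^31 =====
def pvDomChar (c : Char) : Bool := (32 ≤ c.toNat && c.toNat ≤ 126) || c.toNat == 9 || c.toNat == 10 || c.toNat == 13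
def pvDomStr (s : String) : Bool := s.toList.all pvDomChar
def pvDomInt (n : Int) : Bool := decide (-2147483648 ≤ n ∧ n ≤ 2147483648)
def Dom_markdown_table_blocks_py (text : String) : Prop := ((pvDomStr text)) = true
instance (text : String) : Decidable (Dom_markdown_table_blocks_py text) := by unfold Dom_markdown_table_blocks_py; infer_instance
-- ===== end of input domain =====

-- B replaces A's accumulator/flush state machine by a run-extraction scan over pre-rstripped lines (alternative decomposition, same cost).

-- ===== PORT A =====
def markdown_table_blocks_py (text : String) : List String :=
  if text = "" then []
  else
    let lines := (PySem.Str.split? (PySem.Str.replace text "\r\n" "\n") "\n").getD []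
    let r := lines.foldl (fun (st : List (List String) × List String) (line : String) =>
      let line := PySem.Str.rstrip line
      if PySem.Str.isIn "|" line && PySem.Str.startswith (PySem.Str.strip line) "|" then
        (st.1, st.2 ++ [line])
      else
        (if st.2.length ≥ 2 then st.1 ++ [st.2] else st.1, [])) ([], [])
    let blocks := if r.2.length ≥ 2 then r.1 ++ [r.2] else r.1
    blocks.map (fun b => PySem.Str.join "\n" b)

-- ===== PORT B =====
def pvIsRow (line : String) : Bool :=
  PySem.Str.isIn "|" line && PySem.Str.startswith (PySem.Str.strip line) "|"

-- the while-loop of Source B: pull a whole run of table rows off the front, emit it if it has ≥ 2 lines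
def pvScan : List String → List String
  | [] => []
  | l :: ls =>
    if pvIsRow l then
      let run := l :: ls.takeWhile pvIsRow
      (if run.length ≥ 2 then [PySem.Str.join "\n" run] else []) ++ pvScan (ls.dropWhile pvIsRow)
    else pvScan ls
termination_by ms => ms.length
decreasing_by
  · exact Nat.lt_succ_of_le (List.length_dropWhile_le _ _)
  · exact Nat.lt_succ_self _

def markdown_table_blocks_py_alt (text : String) : List String :=
  if text = "" then []
  else
    pvScan (((PySem.Str.split? (PySem.Str.replace text "\r\n" "\n") "\n").getD []).map PySem.Str.rstrip)

-- ===== PRECONDITION & SPEC =====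
def Spec_markdown_table_blocks_py (text : String) (out : List String) : Prop := out = markdown_table_blocks_py_alt text
instance (text : String) (out : List String) : Decidable (Spec_markdown_table_blocks_py text out) := by unfold Spec_markdown_table_blocks_py; infer_instance

-- ===== CLAIM (what is proved, stated in full; the proofs are below) =====
def Claim_equal_markdown_table_blocks_py : Prop := ∀ (text : String), Dom_markdown_table_blocks_py text → Spec_markdown_table_blocks_py text (markdown_table_blocks_py text)

-- ===== LEMMAS AND PROOFS =====

-- A's loop, as a recursion over already-rstripped lines carrying the current block
def pvGA (cur : List String) : List String → List String
  | [] => if cur.length ≥ 2 then [PySem.Str.join "\n" cur] else []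
  | m :: ms =>
    if pvIsRow m then pvGA (cur ++ [m]) ms
    else (if cur.length ≥ 2 then [PySem.Str.join "\n" cur] else []) ++ pvGA [] ms

lemma pvFoldl_eq (ls : List String) : ∀ (bs : List (List String)) (cur : List String),
    (let r := ls.foldl (fun (st : List (List String) × List String) (line : String) =>
      let line := PySem.Str.rstrip line
      if PySem.Str.isIn "|" line && PySem.Str.startswith (PySem.Str.strip line) "|" then
        (st.1, st.2 ++ [line])
      else
        (if st.2.length ≥ 2 then st.1 ++ [st.2] else st.1, [])) (bs, cur)
     (if r.2.length ≥ 2 then r.1 ++ [r.2] else r.1).map (fun b => PySem.Str.join "\n" b))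
    = bs.map (fun b => PySem.Str.join "\n" b) ++ pvGA cur (ls.map PySem.Str.rstrip) := by
  induction ls with
  | nil =>
    intro bs cur
    simp only [List.foldl_nil, List.map_nil, pvGA]
    split_ifs <;> simp
  | cons l ls ih =>
    intro bs cur
    simp only [List.foldl_cons, List.map_cons, pvGA, pvIsRow]
    by_cases h : (PySem.Str.isIn "|" (PySem.Str.rstrip l)
        && PySem.Str.startswith (PySem.Str.strip (PySem.Str.rstrip l)) "|") = true
    · simp only [h, if_pos]
      exact ih bs (cur ++ [PySem.Str.rstrip l])
    · rw [if_neg h, if_neg h]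
      rw [ih (if cur.length ≥ 2 then bs ++ [cur] else bs) []]
      split_ifs <;> simp

lemma pvScan_cons_pos (m : String) (ms : List String) (h : pvIsRow m = true) :
    pvScan (m :: ms) = (if (m :: ms.takeWhile pvIsRow).length ≥ 2
        then [PySem.Str.join "\n" (m :: ms.takeWhile pvIsRow)] else [])
      ++ pvScan (ms.dropWhile pvIsRow) := by
  rw [pvScan, if_pos h]

lemma pvScan_cons_neg (m : String) (ms : List String) (h : ¬ pvIsRow m = true) :
    pvScan (m :: ms) = pvScan ms := by
  rw [pvScan, if_neg h]

lemma pvScan_eq_tw (ms : List String) :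
    pvScan ms = (if (ms.takeWhile pvIsRow).length ≥ 2
        then [PySem.Str.join "\n" (ms.takeWhile pvIsRow)] else [])
      ++ pvScan (ms.dropWhile pvIsRow) := by
  cases ms with
  | nil => simp [pvScan]
  | cons m ms =>
    by_cases h : pvIsRow m = true
    · rw [pvScan_cons_pos m ms h, List.takeWhile_cons_of_pos h, List.dropWhile_cons_of_pos h]
    · rw [pvScan_cons_neg m ms h, List.takeWhile_cons_of_neg h, List.dropWhile_cons_of_neg h]
      simp [pvScan_cons_neg m ms h]

lemma pvGA_eq (ms : List String) : ∀ (cur : List String),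
    pvGA cur ms = (if (cur ++ ms.takeWhile pvIsRow).length ≥ 2
        then [PySem.Str.join "\n" (cur ++ ms.takeWhile pvIsRow)] else [])
      ++ pvScan (ms.dropWhile pvIsRow) := by
  induction ms with
  | nil => intro cur; simp [pvGA, pvScan]
  | cons m ms ih =>
    intro cur
    by_cases h : pvIsRow m = true
    · rw [pvGA, if_pos h, ih (cur ++ [m]), List.takeWhile_cons_of_pos h,
        List.dropWhile_cons_of_pos h]
      simp
    · rw [pvGA, if_neg h, ih [], List.takeWhile_cons_of_neg h, List.dropWhile_cons_of_neg h,
        List.nil_append, ← pvScan_eq_tw, ← pvScan_cons_neg m ms h]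
      simp

lemma pvGA_nil_eq_scan (ms : List String) : pvGA [] ms = pvScan ms := by
  rw [pvGA_eq ms [], List.nil_append, ← pvScan_eq_tw]

-- ===== VERDICT (by name: the statement is the Claim_ definition above) =====
theorem markdown_table_blocks_py_spec : Claim_equal_markdown_table_blocks_py := by
  intro text _
  unfold Spec_markdown_table_blocks_py markdown_table_blocks_py markdown_table_blocks_py_alt
  by_cases h : text = ""
  · simp [h]
  · rw [if_neg h, if_neg h]
    simp only []
    rw [pvFoldl_eq _ [] [], pvGA_nil_eq_scan]
    simp
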